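-- pv_equiv track=rewrite | github.com/jchang153/EigenBench | scripts/run_train.py | _build_model_labels
-- ===== SOURCE A (Python) =====
-- def _build_model_labels(num_models: int, spec_models: dict, extracted_name_map: dict[int, str]) -> list[str]:
--     labels = [f"Model {i}" for i in range(num_models)]
--
--     spec_names = list(spec_models.keys())
--     for i in range(min(num_models, len(spec_names))):
--         labels[i] = spec_names[i]
--
--     # Prefer names extracted from evaluation records when available.
--     for idx, name in extracted_name_map.items():
--         if 0 <= idx < num_models and isinstance(name, str) and name.strip():
--             labels[idx] = name.strip()
--
--     return labels
-- ===== SOURCE B (Python) =====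
-- def _build_model_labels(num_models: int, spec_models: dict, extracted_name_map: dict[int, str]) -> list[str]:
--     spec_names = list(spec_models.keys())
--
--     def label(i: int) -> str:
--         name = extracted_name_map.get(i)
--         if isinstance(name, str) and name.strip():
--             return name.strip()
--         if i < len(spec_names):
--             return spec_names[i]
--         return f"Model {i}"
--
--     return [label(i) for i in range(num_models)]
-- ===== Notes on version B (the rewrite author's own statement) =====
-- stated objective: simpler
-- what changed: Replaces A's initialize-then-overwrite triple pass (default list, spec overlay loop, extracted-name overlay loop) by a single comprehension that resolves each index once by precedence: stripped extracted name if non-empty, else spec name if in range, else the default label.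
import Mathlib
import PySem

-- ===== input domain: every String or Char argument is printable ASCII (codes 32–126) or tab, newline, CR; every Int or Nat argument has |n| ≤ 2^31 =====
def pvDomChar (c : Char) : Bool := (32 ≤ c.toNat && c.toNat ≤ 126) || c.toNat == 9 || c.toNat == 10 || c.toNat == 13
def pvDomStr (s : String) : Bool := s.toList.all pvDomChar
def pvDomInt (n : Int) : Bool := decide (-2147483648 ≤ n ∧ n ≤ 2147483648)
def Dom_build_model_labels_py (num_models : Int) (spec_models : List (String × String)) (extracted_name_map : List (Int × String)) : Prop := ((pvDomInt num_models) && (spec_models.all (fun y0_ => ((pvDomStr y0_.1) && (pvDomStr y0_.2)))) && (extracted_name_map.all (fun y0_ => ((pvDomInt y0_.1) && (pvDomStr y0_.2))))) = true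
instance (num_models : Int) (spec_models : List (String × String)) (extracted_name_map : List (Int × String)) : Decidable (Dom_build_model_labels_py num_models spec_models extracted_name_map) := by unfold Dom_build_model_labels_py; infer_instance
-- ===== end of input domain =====

-- B replaces A's initialize-then-overwrite triple pass by a single pass that resolves each
-- label once by precedence (extracted > spec > default); objective: simpler.

-- ===== PORT A =====
def build_model_labels_py (num_models : Int) (spec_models : List (String × String)) (extracted_name_map : List (Int × String)) : List String :=
  let labels := (PySem.List.pyRange 0 num_models 1).map (fun i => "Model " ++ PySem.Int.toStr i)
  let spec_names := spec_models.map (·.1)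
  let labels := (PySem.List.pyRange 0 (min num_models (spec_names.length : Int)) 1).foldl
      (fun ls i => ls.set i.toNat (PySem.List.pyGetD spec_names i "")) labels
  let labels := extracted_name_map.foldl
      (fun ls p =>
        if 0 ≤ p.1 ∧ p.1 < num_models ∧ PySem.Str.strip p.2 ≠ "" then
          ls.set p.1.toNat (PySem.Str.strip p.2)
        else ls) labels
  labels

-- ===== PORT B =====
-- Source B's fallback after the extracted-name check: spec name if in range, else the default label
def pvFallbackLabel (spec_names : List String) (i : Int) : String :=
  if i < (spec_names.length : Int) then PySem.List.pyGetD spec_names i ""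
  else "Model " ++ PySem.Int.toStr i

def build_model_labels_py_alt (num_models : Int) (spec_models : List (String × String)) (extracted_name_map : List (Int × String)) : List String :=
  let spec_names := spec_models.map (·.1)
  (PySem.List.pyRange 0 num_models 1).map (fun i =>
    match (PySem.Dict.mk extracted_name_map).get? i with
    | some name =>
        if PySem.Str.strip name ≠ "" then PySem.Str.strip name
        else pvFallbackLabel spec_names i
    | none => pvFallbackLabel spec_names i)

-- ===== PRECONDITION & SPEC =====
-- Pre_ excludes extracted_name_map association lists with duplicate keys: a Python dict has
-- unique keys, so such lists encode no input of A (on them A's overwrite keeps the last value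
-- while B's dict lookup takes the first — an artefact of the list encoding, not of A).
def Pre_build_model_labels_py (num_models : Int) (spec_models : List (String × String)) (extracted_name_map : List (Int × String)) : Prop :=
  (extracted_name_map.map (·.1)).Nodup

instance (num_models : Int) (spec_models : List (String × String)) (extracted_name_map : List (Int × String)) : Decidable (Pre_build_model_labels_py num_models spec_models extracted_name_map) := by unfold Pre_build_model_labels_py; infer_instance

def pvWitness_build_model_labels_py : Int × (List (String × String)) × (List (Int × String)) :=
  (3, [("gpt-4", "a"), ("claude", "b")], [(0, " A "), (2, "  ")])

def Spec_build_model_labels_py (num_models : Int) (spec_models : List (String × String)) (extracted_name_map : List (Int × String)) (out : List String) : Prop := out = build_model_labels_py_alt num_models spec_models extracted_name_map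
instance (num_models : Int) (spec_models : List (String × String)) (extracted_name_map : List (Int × String)) (out : List String) : Decidable (Spec_build_model_labels_py num_models spec_models extracted_name_map out) := by unfold Spec_build_model_labels_py; infer_instance

-- ===== CLAIM (what is proved, stated in full; the proofs are below) =====
def Claim_equal_build_model_labels_py : Prop := ∀ (num_models : Int) (spec_models : List (String × String)) (extracted_name_map : List (Int × String)), Dom_build_model_labels_py num_models spec_models extracted_name_map → Pre_build_model_labels_py num_models spec_models extracted_name_map → Spec_build_model_labels_py num_models spec_models extracted_name_map (build_model_labels_py num_models spec_models extracted_name_map)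

-- ===== LEMMAS AND PROOFS =====

-- A's second pass: after overwriting labels[i] := g i for i in range(lo, m), position k holds
-- g k when lo ≤ k < m, and its old value otherwise.
lemma pvFoldlRangeSet {α : Type} (g : Int → α) (lo m : Int) (ls : List α) (k : Nat)
    (hlo : 0 ≤ lo) (hm : m ≤ (ls.length : Int)) :
    ((PySem.List.pyRange lo m 1).foldl (fun ls i => ls.set i.toNat (g i)) ls)[k]? =
      if lo ≤ (k : Int) ∧ (k : Int) < m then some (g k) else ls[k]? := by
  by_cases h : m ≤ lo
  · rw [PySem.List.pyRange_one_eq_nil h]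
    simp only [List.foldl_nil]
    split_ifs with hc
    · omega
    · rfl
  · replace h : lo < m := by omega
    rw [PySem.List.pyRange_one_cons h]
    simp only [List.foldl_cons]
    rw [pvFoldlRangeSet g (lo + 1) m _ k (by omega) (by simpa using hm)]
    rcases eq_or_ne (lo : Int) (k : Int) with hk | hk
    · have hkn : lo.toNat = k := by omega
      rw [List.getElem?_set]
      split_ifs with h1 h2 h3 <;> simp_all <;> omega
    · have hkn : lo.toNat ≠ k := by omega
      rw [List.getElem?_set]
      split_ifs with h1 h2 h3 <;> simp_all <;> omega
termination_by (m - lo).toNat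
decreasing_by omega

-- A's third pass preserves the list's length
lemma pvExtLen (nm : Int) (l : List (Int × String)) (ls : List String) :
    (l.foldl (fun ls p =>
      if 0 ≤ p.1 ∧ p.1 < nm ∧ PySem.Str.strip p.2 ≠ "" then
        ls.set p.1.toNat (PySem.Str.strip p.2)
      else ls) ls).length = ls.length := by
  induction l generalizing ls with
  | nil => rfl
  | cons x t iht => simp only [List.foldl_cons]; rw [iht]; split_ifs <;> simp

-- A's third pass with duplicate-free keys: position k < num_models ends up holding the stripped
-- extracted name for key k when it strips non-empty, and its old value otherwise.
lemma pvFoldlExtracted (nm : Int) (l : List (Int × String)) (ls : List String) (k : Nat)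
    (hk : k < ls.length) (hnd : (l.map (·.1)).Nodup) (hknm : (k : Int) < nm) :
    (l.foldl (fun ls p =>
        if 0 ≤ p.1 ∧ p.1 < nm ∧ PySem.Str.strip p.2 ≠ "" then
          ls.set p.1.toNat (PySem.Str.strip p.2)
        else ls) ls)[k]? =
      (match (PySem.Dict.mk l).get? (k : Int) with
       | some name => if PySem.Str.strip name ≠ "" then some (PySem.Str.strip name) else ls[k]?
       | none => ls[k]?) := by
  induction l generalizing ls with
  | nil => simp [PySem.Dict.get?, PySem.Dict.items]
  | cons p rest ih =>
    obtain ⟨key, name⟩ := p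
    simp only [List.map_cons, List.nodup_cons] at hnd
    rw [List.foldl_cons, PySem.Dict.get?_mk_cons]
    rcases eq_or_ne key ((k : Int)) with hkey | hkey
    · subst hkey
      simp only [beq_self_eq_true, if_true]
      -- rest has no pair with key k, so the tail fold leaves position k alone
      have hnone : (PySem.Dict.mk rest).get? ((k : Int)) = none := by
        rw [PySem.Dict.get?_eq_none_iff_not_mem_keys]
        simpa using hnd.1
      rw [ih _ (by split_ifs <;> simp [hk]) hnd.2]
      rw [hnone]
      by_cases hs : PySem.Str.strip name ≠ ""
      · have hcond : (0 ≤ (k : Int) ∧ (k : Int) < nm ∧ PySem.Str.strip name ≠ "") := ⟨by omega, hknm, hs⟩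
        simp only [if_pos hcond, hs, if_true]
        rw [List.getElem?_set]
        simp [hk, hs]
      · have hcond : ¬(0 ≤ (k : Int) ∧ (k : Int) < nm ∧ PySem.Str.strip name ≠ "") := by tauto
        simp only [if_neg hcond]
        simp [hs]
    · have hbeq : (key == (k : Int)) = false := by simpa using hkey
      rw [hbeq]
      simp only [Bool.false_eq_true, if_false]
      rw [ih _ (by split_ifs <;> simp [hk]) hnd.2]
      have hset : (if 0 ≤ key ∧ key < nm ∧ PySem.Str.strip name ≠ "" then
          ls.set key.toNat (PySem.Str.strip name) else ls)[k]? = ls[k]? := by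
        split_ifs with hc
        · rw [List.getElem?_set]
          have : key.toNat ≠ k := by omega
          simp [this]
        · rfl
      rw [hset]

-- ===== VERDICT (by name: the statement is the Claim_ definition above) =====
theorem build_model_labels_py_spec : Claim_equal_build_model_labels_py := by
  intro nm spec ext _hdom hpre
  unfold Spec_build_model_labels_py build_model_labels_py build_model_labels_py_alt
  simp only []
  apply List.ext_getElem?
  intro k
  set spec_names := spec.map (·.1) with hsn
  -- length of the base list
  have hbase_len : ((PySem.List.pyRange 0 nm 1).map
      (fun i => "Model " ++ PySem.Int.toStr i)).length = (nm - 0).toNat := by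
    rw [List.length_map, PySem.List.length_pyRange_one]
  -- length after the spec pass
  have hmid_len : ∀ (ls : List String),
      ((PySem.List.pyRange 0 (min nm (spec_names.length : Int)) 1).foldl
        (fun ls i => ls.set i.toNat (PySem.List.pyGetD spec_names i "")) ls).length = ls.length := by
    intro ls
    induction (PySem.List.pyRange 0 (min nm (spec_names.length : Int)) 1) generalizing ls with
    | nil => rfl
    | cons x t iht => simp only [List.foldl_cons]; rw [iht]; simp
  by_cases hk : (k : Int) < nm
  · -- in-range index
    have hk' : k < (nm - 0).toNat := by omega
    rw [pvFoldlExtracted nm ext _ k (by rw [hmid_len, hbase_len]; omega) hpre hk]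
    rw [pvFoldlRangeSet _ 0 (min nm (spec_names.length : Int)) _ k (le_refl 0)
        (by rw [hbase_len]; omega)]
    rw [List.getElem?_map, PySem.List.getElem?_pyRange_one]
    simp only [hk', if_true, Option.map_some]
    have hfall : (if 0 ≤ (k : Int) ∧ (k : Int) < min nm (spec_names.length : Int) then
        some (PySem.List.pyGetD spec_names (k : Int) "")
        else some ("Model " ++ PySem.Int.toStr (0 + (k : Int)))) =
        some (pvFallbackLabel spec_names (k : Int)) := by
      unfold pvFallbackLabel
      split_ifs with h1 h2 h3
      · rfl
      · omega
      · omega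
      · norm_num
    rw [hfall]
    cases hget : (PySem.Dict.mk ext).get? ((k : Int)) with
    | none => simp [hget, hk]
    | some name =>
      by_cases hs : PySem.Str.strip name ≠ "" <;> simp [hget, hs, hk]
  · -- out of range: both sides are none
    rw [List.getElem?_eq_none (by rw [pvExtLen, hmid_len, hbase_len]; omega)]
    rw [List.getElem?_eq_none (by rw [List.length_map, PySem.List.length_pyRange_one]; omega)]
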